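-- pv_equiv track=rewrite | github.com/kospen/beeai-framework-py-starter | tmp_rag_guardrails_impl.py | _split_into_claims
-- ===== SOURCE A (Python) =====
-- from typing import Any, Dict, List, Optional, Set, Tuple
--
-- def _split_into_claims(answer_text: str) -> List[str]:
--     claims: List[str] = []
--     buf: list[str] = []
--
--     for ch in answer_text:
--         if ch == "\n" or ch in ".?!":
--             segment = "".join(buf).strip()
--             if segment:
--                 claims.append(segment)
--             buf = []
--         else:
--             buf.append(ch)
--
--     tail = "".join(buf).strip()
--     if tail:
--         claims.append(tail)
--
--     return claims
-- ===== SOURCE B (Python) =====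
-- from typing import List
--
--
-- def _split_into_claims(answer_text: str) -> List[str]:
--     segments = [answer_text]
--     for delim in ".?!\n":
--         segments = [part for seg in segments for part in seg.split(delim)]
--     return [seg.strip() for seg in segments if seg.strip()]
-- ===== Notes on version B (the rewrite author's own statement) =====
-- stated objective: idiomatic
-- what changed: Replaces A's character-by-character loop with a claims list and a mutable character buffer by repeated str.split on each of the four delimiters followed by a single strip-and-filter comprehension.
import Mathlib
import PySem

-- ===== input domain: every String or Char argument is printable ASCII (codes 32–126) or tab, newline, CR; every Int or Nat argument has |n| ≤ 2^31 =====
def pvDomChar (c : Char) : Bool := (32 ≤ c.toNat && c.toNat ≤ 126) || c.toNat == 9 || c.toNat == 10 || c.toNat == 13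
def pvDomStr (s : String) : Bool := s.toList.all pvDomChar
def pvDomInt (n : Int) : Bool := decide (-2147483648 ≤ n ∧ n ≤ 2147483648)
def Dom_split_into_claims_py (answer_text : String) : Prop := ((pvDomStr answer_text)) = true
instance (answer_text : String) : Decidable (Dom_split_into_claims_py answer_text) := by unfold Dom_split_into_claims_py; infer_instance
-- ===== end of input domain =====

-- B replaces A's character-by-character buffer loop with repeated str.split on each delimiter
-- followed by a strip-and-filter comprehension (idiomatic; same cost).

-- ===== PORT A =====
-- the loop over the characters of answer_text, state = (claims, buf);
-- `ch in ".?!"` on the single char ch is membership among '.', '?', '!' (exact);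
-- `"".join(buf)` with buf a list of single chars is the string of those chars.
def pvALoop (claims : List String) (buf : List Char) : List Char → List String
  | [] =>
    let tail := PySem.Chars.strip buf
    if tail ≠ [] then claims ++ [String.ofList tail] else claims
  | ch :: rest =>
    if ch == '\n' || (ch == '.' || ch == '?' || ch == '!') then
      let segment := PySem.Chars.strip buf
      pvALoop (if segment ≠ [] then claims ++ [String.ofList segment] else claims) [] rest
    else
      pvALoop claims (buf ++ [ch]) rest

def split_into_claims_py (answer_text : String) : List String :=
  pvALoop [] [] answer_text.toList

-- ===== PORT B =====
-- segments = [answer_text]; for delim in ".?!\n": segments = [part for seg in segments for part in seg.split(delim)];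
-- return [seg.strip() for seg in segments if seg.strip()]   (strings handled as their char lists)
def split_into_claims_py_alt (answer_text : String) : List String :=
  let segments :=
    (".?!\n".toList).foldl
      (fun segs d => segs.flatMap (fun seg => PySem.Chars.splitOn seg [d]))
      [answer_text.toList]
  (segments.filter (fun seg => PySem.Chars.strip seg ≠ [])).map
    (fun seg => String.ofList (PySem.Chars.strip seg))

-- ===== PRECONDITION & SPEC =====
def Spec_split_into_claims_py (answer_text : String) (out : List String) : Prop := out = split_into_claims_py_alt answer_text
instance (answer_text : String) (out : List String) : Decidable (Spec_split_into_claims_py answer_text out) := by unfold Spec_split_into_claims_py; infer_instance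

-- ===== CLAIM (what is proved, stated in full; the proofs are below) =====
def Claim_equal_split_into_claims_py : Prop := ∀ (answer_text : String), Dom_split_into_claims_py answer_text → Spec_split_into_claims_py answer_text (split_into_claims_py answer_text)

-- ===== LEMMAS AND PROOFS =====

-- reference splitter: split a char list on every char satisfying p
def pvSplitP (p : Char → Bool) : List Char → List (List Char)
  | [] => [[]]
  | c :: r => if p c then [] :: pvSplitP p r else (pvSplitP p r).modifyHead (c :: ·)

theorem pvSplitP_ne_nil (p : Char → Bool) (l : List Char) : pvSplitP p l ≠ [] := by
  cases l with
  | nil => simp [pvSplitP]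
  | cons c r =>
    simp only [pvSplitP]
    split
    · simp
    · intro h
      have := congrArg List.length h
      simp at this
      exact pvSplitP_ne_nil p r this

theorem pvModifyHead_nil_append (l : List (List Char)) :
    l.modifyHead (fun s => ([] : List Char) ++ s) = l := by
  cases l <;> simp [List.modifyHead]

theorem pvModifyHead_append_left {α : Type} (f : List α → List α) (xs ys : List (List α))
    (h : xs ≠ []) : xs.modifyHead f ++ ys = (xs ++ ys).modifyHead f := by
  cases xs with
  | nil => exact absurd rfl h
  | cons a t => simp [List.modifyHead]

theorem pvGo_cons (sep : List Char) (f : Nat) (c : Char) (rest cur : List Char)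
    (acc : List (List Char)) :
    PySem.Chars.splitOn.go sep (f+1) (c::rest) cur acc =
      if sep.isPrefixOf (c::rest) then
        PySem.Chars.splitOn.go sep f (List.drop sep.length (c::rest)) [] (cur.reverse::acc)
      else PySem.Chars.splitOn.go sep f rest (c::cur) acc := rfl

theorem pvModifyHead_id (l : List (List Char)) :
    l.modifyHead (fun s : List Char => s) = l := by
  cases l <;> simp [List.modifyHead]

theorem pvGo_single (d : Char) (fuel : Nat) (l cur : List Char) (acc : List (List Char))
    (h : l.length < fuel) :
    PySem.Chars.splitOn.go [d] fuel l cur acc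
      = acc.reverse ++ (pvSplitP (· == d) l).modifyHead (cur.reverse ++ ·) := by
  induction fuel generalizing l cur acc with
  | zero => omega
  | succ f ih =>
    cases l with
    | nil =>
      show (cur.reverse :: acc).reverse = _
      simp [pvSplitP, List.modifyHead]
    | cons c rest =>
      rw [pvGo_cons]
      by_cases hc : c = d
      · subst hc
        rw [if_pos (by simp [List.isPrefixOf])]
        rw [ih _ [] _ (by simpa using Nat.lt_of_succ_lt_succ h)]
        simp only [pvSplitP, beq_self_eq_true, if_pos, List.reverse_cons, List.reverse_nil,
          List.nil_append, List.append_assoc, List.modifyHead, List.singleton_append]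
        cases hsp : pvSplitP (fun x => x == c) rest <;> simp [hsp]
      · have hpre : ([d].isPrefixOf (c :: rest)) = false := by
          simp [List.isPrefixOf]
          exact fun hh => hc hh.symm
        rw [if_neg (by simp [hpre])]
        rw [ih rest (c :: cur) acc (by simpa using Nat.lt_of_succ_lt_succ h)]
        have hne : (c == d) = false := by simp [hc]
        simp [pvSplitP, hne, List.modifyHead_modifyHead]
        rfl

theorem pvSplitOn_single (d : Char) (l : List Char) :
    PySem.Chars.splitOn l [d] = pvSplitP (· == d) l := by
  unfold PySem.Chars.splitOn
  rw [pvGo_single d (l.length + 1) l [] [] (by omega)]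
  simpa using pvModifyHead_id (pvSplitP (· == d) l)

theorem pvFlatMap_splitP (p q : Char → Bool) (l : List Char) :
    (pvSplitP p l).flatMap (pvSplitP q) = pvSplitP (fun c => p c || q c) l := by
  induction l with
  | nil => simp [pvSplitP]
  | cons c r ih =>
    by_cases hp : p c = true
    · simp [pvSplitP, hp, ih]
    · have hp' : p c = false := by simpa using hp
      obtain ⟨hd, tl, hht⟩ : ∃ hd tl, pvSplitP p r = hd :: tl := by
        cases hh : pvSplitP p r with
        | nil => exact absurd hh (pvSplitP_ne_nil p r)
        | cons a t => exact ⟨a, t, rfl⟩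
      have hbase : pvSplitP (fun c => p c || q c) r = pvSplitP q hd ++ tl.flatMap (pvSplitP q) := by
        rw [← ih, hht]; simp
      have goalL : pvSplitP p (c :: r) = (c :: hd) :: tl := by
        simp [pvSplitP, hp', hht, List.modifyHead]
      have goalR : pvSplitP (fun c => p c || q c) (c :: r)
          = if q c then [] :: (pvSplitP q hd ++ tl.flatMap (pvSplitP q))
            else (pvSplitP q hd ++ tl.flatMap (pvSplitP q)).modifyHead (c :: ·) := by
        by_cases hq : q c = true
        · simp [pvSplitP, hp', hq, hbase]
        · have hq' : q c = false := by simpa using hq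
          simp [pvSplitP, hp', hq', hbase]
      rw [goalL, goalR]
      by_cases hq : q c = true
      · rw [if_pos hq]
        simp only [List.flatMap_cons]
        rw [show pvSplitP q (c::hd) = [] :: pvSplitP q hd by simp [pvSplitP, hq]]
        simp
      · have hq' : q c = false := by simpa using hq
        rw [if_neg (by simp [hq'])]
        simp only [List.flatMap_cons]
        rw [show pvSplitP q (c::hd) = (pvSplitP q hd).modifyHead (c :: ·) by simp [pvSplitP, hq']]
        exact pvModifyHead_append_left _ _ _ (pvSplitP_ne_nil q hd)

-- loop invariant for A
theorem pvALoop_spec (cs : List Char) : ∀ (claims : List String) (buf : List Char),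
    pvALoop claims buf cs
      = claims ++
        ((((pvSplitP (fun c => c == '\n' || (c == '.' || c == '?' || c == '!')) cs).modifyHead
            (buf ++ ·)).filter (fun seg => PySem.Chars.strip seg ≠ [])).map
          (fun seg => String.ofList (PySem.Chars.strip seg))) := by
  induction cs with
  | nil =>
    intro claims buf
    simp only [pvALoop, pvSplitP, List.modifyHead, List.append_nil]
    split <;> simp_all [List.filter, List.map]
  | cons c rest ih =>
    intro claims buf
    by_cases hc : (c == '\n' || (c == '.' || c == '?' || c == '!')) = true
    · simp only [pvALoop, hc, if_pos, pvSplitP, List.modifyHead]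
      rw [ih]
      rw [pvModifyHead_nil_append]
      simp only [List.filter, List.append_nil]
      split <;> simp_all
    · have hc' : (c == '\n' || (c == '.' || c == '?' || c == '!')) = false := by simpa using hc
      have hA : pvALoop claims buf (c :: rest) = pvALoop claims (buf ++ [c]) rest := by
        simp [pvALoop, hc']
      have hS : pvSplitP (fun c => c == '\n' || (c == '.' || c == '?' || c == '!')) (c :: rest)
          = (pvSplitP (fun c => c == '\n' || (c == '.' || c == '?' || c == '!')) rest).modifyHead
              (c :: ·) := by
        simp [pvSplitP, hc']
      rw [hA, ih, hS, List.modifyHead_modifyHead]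
      have hfun : ((fun x => buf ++ x) ∘ (fun x => c :: x) : List Char → List Char)
          = (fun x => (buf ++ [c]) ++ x) := funext fun s => by simp
      rw [hfun]

theorem pvSplitP_congr (p q : Char → Bool) (h : ∀ c, p c = q c) (l : List Char) :
    pvSplitP p l = pvSplitP q l := by
  induction l with
  | nil => rfl
  | cons c r ih => simp [pvSplitP, h c, ih]

-- ===== VERDICT (by name: the statement is the Claim_ definition above) =====
theorem split_into_claims_py_spec : Claim_equal_split_into_claims_py := by
  intro s _
  unfold Spec_split_into_claims_py split_into_claims_py split_into_claims_py_alt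
  rw [pvALoop_spec, pvModifyHead_nil_append]
  have htl : (".?!\n" : String).toList = ['.', '?', '!', '\n'] := rfl
  have hso : ∀ d : Char, (fun seg => PySem.Chars.splitOn seg [d]) = pvSplitP (· == d) :=
    fun d => funext fun seg => pvSplitOn_single d seg
  simp only [htl, List.foldl_cons, List.foldl_nil, hso, List.flatMap_cons, List.flatMap_nil,
    List.append_nil, pvFlatMap_splitP]
  rw [pvSplitP_congr (fun c => ((c == '.' || c == '?') || c == '!') || c == '\n')
        (fun c => c == '\n' || (c == '.' || c == '?' || c == '!'))
        (fun c => by cases h1 : c == '\n' <;> cases h2 : c == '.' <;> cases h3 : c == '?' <;>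
          cases h4 : c == '!' <;> simp [h1, h2, h3, h4]) s.toList]
  simp
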